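-- pv_equiv track=rewrite | github.com/sha8e/transmorgify | hex_util.py | split_hex
-- ===== SOURCE A (Python) =====
-- def split_hex(hex_data, split_number=2):
--
--     # Seeing if content has unnecessary characters
--     if '\'' in str(hex_data):
--         hex_data = str(hex_data).split("'")[1]
--     else:
--         hex_data = str(hex_data)
--
--     new_string = str()
--     split_every = split_number - 1
--     count = 0
--
--     # Splitting the string
--     for c in hex_data:
--         if count < split_every:
--             count += 1
--             new_string += c
--
--         elif count == split_every:
--             count = 0
--             new_string += c + " "
--
--     return new_string
-- ===== SOURCE B (Python) =====
-- def _chunk(s, k):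
--     # recursive chunking: full groups of k chars get a trailing space,
--     # a final partial group does not
--     if not s:
--         return ""
--     if len(s) < k:
--         return s
--     return s[:k] + " " + _chunk(s[k:], k)
--
--
-- def split_hex(hex_data, split_number=2):
--     s = str(hex_data)
--     if "'" in s:
--         s = s.split("'")[1]
--     if split_number <= 0:
--         return ""
--     return _chunk(s, split_number)
-- ===== Notes on version B (the rewrite author's own statement) =====
-- stated objective: simpler
-- what changed: Replaces A's per-character loop with a running group counter by a direct recursive decomposition into slices of split_number characters (full slices followed by a space, a partial tail kept as is).
import Mathlib
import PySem

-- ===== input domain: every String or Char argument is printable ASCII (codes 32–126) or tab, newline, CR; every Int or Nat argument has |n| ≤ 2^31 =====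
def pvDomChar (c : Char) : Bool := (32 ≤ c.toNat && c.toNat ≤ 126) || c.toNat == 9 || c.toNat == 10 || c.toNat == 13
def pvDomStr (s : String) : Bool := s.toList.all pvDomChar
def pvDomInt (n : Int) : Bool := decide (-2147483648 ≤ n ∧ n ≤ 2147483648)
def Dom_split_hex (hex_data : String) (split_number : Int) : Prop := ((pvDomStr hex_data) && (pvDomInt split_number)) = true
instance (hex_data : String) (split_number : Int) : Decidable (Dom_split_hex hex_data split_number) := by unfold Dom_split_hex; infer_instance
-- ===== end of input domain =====

-- B replaces A's per-character counter loop by a recursive decomposition into slices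
-- of split_number characters (objective: simpler).

-- ===== PORT A =====
-- literal port of A: strip the quoted part, then a per-character loop carrying
-- (new_string, count); count < split_every takes the char, count == split_every
-- takes the char plus a space and resets.  (The `[1]` after split always exists
-- when a quote is present, so `.getD ""` is never the raising case.)
def split_hex (hex_data : String) (split_number : Int) : String :=
  let hd : String :=
    if PySem.Str.isIn "'" hex_data then
      (PySem.List.pyGet? ((PySem.Str.split? hex_data "'").getD []) 1).getD ""
    else hex_data
  let split_every := split_number - 1
  let r := hd.toList.foldl
    (fun (st : List Char × Int) c =>
      if st.2 < split_every then (st.1 ++ [c], st.2 + 1)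
      else if st.2 = split_every then (st.1 ++ [c, ' '], 0)
      else st)
    ([], 0)
  String.ofList r.1

-- ===== PORT B =====
-- _chunk from Source B; it is only called with k = split_number ≥ 1, so s[:k]/s[k:]
-- are List.take/List.drop and k is carried as a Nat (split_number.toNat).
-- The `k = 0` branch is unreachable under that guard; it only makes the recursion total.
def chunkB (k : Nat) (s : List Char) : List Char :=
  if s = [] then []
  else if s.length < k then s
  else if k = 0 then s
  else s.take k ++ ' ' :: chunkB k (s.drop k)
termination_by s.length
decreasing_by
  simp only [List.length_drop]
  rename_i h1 _ h3
  have : s.length ≠ 0 := fun h => h1 (List.eq_nil_of_length_eq_zero h)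
  omega

def split_hex_alt (hex_data : String) (split_number : Int) : String :=
  let s : String :=
    if PySem.Str.isIn "'" hex_data then
      (PySem.List.pyGet? ((PySem.Str.split? hex_data "'").getD []) 1).getD ""
    else hex_data
  if split_number ≤ 0 then ""
  else String.ofList (chunkB split_number.toNat s.toList)

-- ===== PRECONDITION & SPEC =====
def Spec_split_hex (hex_data : String) (split_number : Int) (out : String) : Prop := out = split_hex_alt hex_data split_number
instance (hex_data : String) (split_number : Int) (out : String) : Decidable (Spec_split_hex hex_data split_number out) := by unfold Spec_split_hex; infer_instance

-- ===== CLAIM (what is proved, stated in full; the proofs are below) =====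
def Claim_equal_split_hex : Prop := ∀ (hex_data : String) (split_number : Int), Dom_split_hex hex_data split_number → Spec_split_hex hex_data split_number (split_hex hex_data split_number)

-- ===== LEMMAS AND PROOFS =====

-- functional restatement of A's loop body (k = split_number)
def fA (k cnt : Int) : List Char → List Char
  | [] => []
  | c :: t =>
    if cnt < k - 1 then c :: fA k (cnt + 1) t
    else if cnt = k - 1 then c :: ' ' :: fA k 0 t
    else fA k cnt t

theorem foldA_eq (k : Int) (s : List Char) : ∀ (acc : List Char) (cnt : Int),
    (s.foldl (fun (st : List Char × Int) c =>
      if st.2 < k - 1 then (st.1 ++ [c], st.2 + 1)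
      else if st.2 = k - 1 then (st.1 ++ [c, ' '], 0)
      else st) (acc, cnt)).1 = acc ++ fA k cnt s := by
  induction s with
  | nil => intro acc cnt; simp [fA]
  | cons c t ih =>
    intro acc cnt
    simp only [List.foldl_cons, fA]
    by_cases h1 : cnt < k - 1
    · simp [h1, ih, List.append_assoc]
    · by_cases h2 : cnt = k - 1
      · simp [h2, ih, List.append_assoc]
      · simp [h1, h2, ih]

theorem fA_nonpos (k : Int) (_hk : k ≤ 0) (s : List Char) : fA k 0 s = [] := by
  induction s with
  | nil => rfl
  | cons c t ih =>
    simp only [fA]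
    rw [if_neg (by omega), if_neg (by omega)]
    exact ih

theorem fA_chunk (k : Int) (hk : 1 ≤ k) : ∀ (s : List Char) (cnt : Int),
    0 ≤ cnt → cnt < k →
    fA k cnt s = if (s.length : Int) < k - cnt then s
      else s.take (k - cnt).toNat ++ ' ' :: fA k 0 (s.drop (k - cnt).toNat) := by
  intro s
  induction s with
  | nil => intro cnt h0 h1; rw [fA, if_pos (by simp; omega)]
  | cons c t ih =>
    intro cnt h0 h1
    simp only [fA, List.length_cons]
    by_cases hlt : cnt < k - 1
    · rw [if_pos hlt, ih (cnt + 1) (by omega) (by omega)]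
      have hsplit : (k - cnt).toNat = (k - (cnt + 1)).toNat + 1 := by omega
      by_cases hc : (t.length : Int) < k - (cnt + 1)
      · rw [if_pos hc, if_pos (by push_cast; omega)]
      · rw [if_neg hc, if_neg (by push_cast; omega), hsplit,
          List.take_succ_cons, List.drop_succ_cons]
        simp
    · have hceq : cnt = k - 1 := by omega
      rw [if_neg hlt, if_pos hceq]
      have h1 : (k - cnt).toNat = 1 := by omega
      rw [if_neg (by push_cast; omega), h1]
      simp

theorem chunkB_eq_fA (k : Int) (hk : 1 ≤ k) (s : List Char) :
    chunkB k.toNat s = fA k 0 s := by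
  induction hn : s.length using Nat.strong_induction_on generalizing s with
  | _ n ih =>
    rw [chunkB]
    by_cases hnil : s = []
    · simp [hnil, fA]
    · rw [if_neg hnil]
      rw [fA_chunk k hk s 0 le_rfl (by omega)]
      simp only [sub_zero]
      by_cases hlen : s.length < k.toNat
      · rw [if_pos hlen, if_pos (by omega)]
      · rw [if_neg hlen, if_neg (by omega), if_neg (by omega)]
        have hdrop : (s.drop k.toNat).length < n := by
          subst hn
          have : s.length ≠ 0 := fun h => hnil (List.eq_nil_of_length_eq_zero h)
          simp only [List.length_drop]; omega
        rw [ih _ hdrop _ rfl]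

-- ===== VERDICT (by name: the statement is the Claim_ definition above) =====
theorem split_hex_spec : Claim_equal_split_hex := by
  intro hex_data split_number _
  unfold Spec_split_hex split_hex split_hex_alt
  simp only
  rw [foldA_eq]
  by_cases hk : split_number ≤ 0
  · rw [if_pos hk, fA_nonpos split_number hk]
    rfl
  · rw [if_neg hk, chunkB_eq_fA split_number (by omega)]
    rfl
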